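-- pv_equiv track=rewrite | github.com/ayoubc/competitive-programming | online_judges/codechef/ADADISH.py | solve
-- ===== SOURCE A (Python) =====
-- def solve(c):
--     c.sort(reverse=True)
--     a, b = 0, 0
--     for val in c:
--         if a <= b:
--             a += val
--         else:
--             b += val
--
--     return max(a, b)
-- ===== SOURCE B (Python) =====
-- def solve(c):
--     # Branch-free: the gap |a-b| between the two piles evolves as g -> |val - g|,
--     # so no piles are simulated at all; the larger pile is (sum + gap) // 2.
--     # c.sort is kept in-place to preserve A's argument mutation.
--     c.sort(reverse=True)
--     g = 0
--     for val in c: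
--         g = abs(val - g)
--     return (sum(c) + g) // 2
-- ===== Notes on version B (the rewrite author's own statement) =====
-- stated objective: alternative
-- what changed: Drops the two-pile simulation and its branch entirely: a single branch-free fold g -> |val - g| tracks the gap between the piles, and the larger pile is reconstructed as (sum(c) + g) // 2.
import Mathlib
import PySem

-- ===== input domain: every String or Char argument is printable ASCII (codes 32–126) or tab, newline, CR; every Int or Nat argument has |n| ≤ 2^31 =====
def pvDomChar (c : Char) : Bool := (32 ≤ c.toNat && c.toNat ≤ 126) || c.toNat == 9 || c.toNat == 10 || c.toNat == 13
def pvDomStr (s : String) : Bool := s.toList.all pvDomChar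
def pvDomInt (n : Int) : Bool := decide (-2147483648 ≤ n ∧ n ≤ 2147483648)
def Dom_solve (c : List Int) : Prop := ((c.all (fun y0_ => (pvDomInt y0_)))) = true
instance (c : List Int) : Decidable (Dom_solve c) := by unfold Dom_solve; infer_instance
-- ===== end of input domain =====

-- B drops the two-pile simulation and its branch: a branch-free fold g -> |val - g|
-- tracks the gap between the piles, and the larger pile is (sum + g) // 2.
-- Both ports mimic A's in-place sort on the local list only; the equivalence proved
-- is about the return value (B performs the same in-place sort mutation).


-- ===== PORT A =====
def solve (c : List Int) : Int :=
  let cs := PySem.List.sorted c (fun x => x) (reverse := true)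
  let ab := cs.foldl (fun (ab : Int × Int) val =>
      if ab.1 ≤ ab.2 then (ab.1 + val, ab.2) else (ab.1, ab.2 + val)) (0, 0)
  max ab.1 ab.2

-- ===== PORT B =====
def solve_alt (c : List Int) : Int :=
  let cs := PySem.List.sorted c (fun x => x) (reverse := true)
  let g := cs.foldl (fun g val => |val - g|) 0
  PySem.Int.floordiv (cs.foldl (· + ·) 0 + g) 2

-- ===== PRECONDITION & SPEC =====
def Spec_solve (c : List Int) (out : Int) : Prop := out = solve_alt c
instance (c : List Int) (out : Int) : Decidable (Spec_solve c out) := by unfold Spec_solve; infer_instance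

-- ===== CLAIM (what is proved, stated in full; the proofs are below) =====
def Claim_equal_solve : Prop := ∀ (c : List Int), Dom_solve c → Spec_solve c (solve c)

-- ===== LEMMAS AND PROOFS =====

/-- A's pair fold tracked through its sum and the absolute gap of its two piles:
    the sum accumulates the list sum, and the gap evolves exactly as B's
    branch-free fold `g ↦ |val - g|`. -/
theorem pv_fold_invariant (l : List Int) (a b : Int) :
    (l.foldl (fun (ab : Int × Int) val =>
        if ab.1 ≤ ab.2 then (ab.1 + val, ab.2) else (ab.1, ab.2 + val)) (a, b)).1
      + (l.foldl (fun (ab : Int × Int) val =>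
        if ab.1 ≤ ab.2 then (ab.1 + val, ab.2) else (ab.1, ab.2 + val)) (a, b)).2
      = (l.foldl (· + ·) (a + b))
    ∧ |(l.foldl (fun (ab : Int × Int) val =>
        if ab.1 ≤ ab.2 then (ab.1 + val, ab.2) else (ab.1, ab.2 + val)) (a, b)).1
      - (l.foldl (fun (ab : Int × Int) val =>
        if ab.1 ≤ ab.2 then (ab.1 + val, ab.2) else (ab.1, ab.2 + val)) (a, b)).2|
      = l.foldl (fun g val => |val - g|) |a - b| := by
  induction l generalizing a b with
  | nil => simp
  | cons x t ih =>
    simp only [List.foldl_cons]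
    by_cases h : a ≤ b
    · rw [if_pos h]
      have e2 : abs (x - |a - b|) = |a + x - b| := by
        rw [abs_of_nonpos (by omega : a - b ≤ 0)]
        congr 1; ring
      rw [e2, show (a : Int) + b + x = a + x + b from by ring]
      exact ih (a + x) b
    · rw [if_neg h]
      have e2 : abs (x - |a - b|) = |a - (b + x)| := by
        rw [abs_of_nonneg (by omega : (0 : Int) ≤ a - b), abs_sub_comm]
        congr 1; ring
      rw [e2, show (a : Int) + b + x = a + (b + x) from by ring]
      exact ih a (b + x)

theorem pv_max_formula (a b : Int) : max a b = PySem.Int.floordiv (a + b + |a - b|) 2 := by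
  rw [PySem.Int.floordiv_eq_ediv_of_pos (by norm_num)]
  rcases le_total a b with h | h
  · rw [abs_of_nonpos (by omega), max_eq_right h]; omega
  · rw [abs_of_nonneg (by omega), max_eq_left h]; omega

-- ===== VERDICT (by name: the statement is the Claim_ definition above) =====
theorem solve_spec : Claim_equal_solve := by
  intro c _
  unfold Spec_solve solve solve_alt
  simp only []
  set cs := PySem.List.sorted c (fun x => x) (reverse := true) with hcs
  have h := pv_fold_invariant cs 0 0
  rw [pv_max_formula, h.1]
  have hg : |(0 : Int) - 0| = 0 := by norm_num
  rw [hg] at h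
  rw [h.2]
  norm_num
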